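-- pv_equiv track=rewrite | github.com/watakook/Assignment7 | bitwise_operations.py | bitwise_operations
-- ===== SOURCE A (Python) =====
-- def bitwise_operations(numbers):
--     """ Perform AND, OR, XOR bitwise operations """
--     and_result = numbers[0]
--     or_result = numbers[0]
--     xor_result = numbers[0]
--
--     for num in numbers[1:]:
--         and_result &= num
--         or_result |= num
--         xor_result ^= num
--
--     return and_result, or_result, xor_result
-- ===== SOURCE B (Python) =====
-- def bitwise_operations(numbers):
--     """ Perform AND, OR, XOR bitwise operations """
--     if len(numbers) <= 1:
--         n = numbers[0]
--         return (n, n, n)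
--     mid = len(numbers) // 2
--     a1, o1, x1 = bitwise_operations(numbers[:mid])
--     a2, o2, x2 = bitwise_operations(numbers[mid:])
--     return (a1 & a2, o1 | o2, x1 ^ x2)
-- ===== Notes on version B (the rewrite author's own statement) =====
-- stated objective: alternative
-- what changed: Replaced the single left-to-right loop carrying three accumulators by a divide-and-conquer recursion that splits the list in half, recurses on each half and combines the halves' AND/OR/XOR results pairwise; correct because &, | and ^ are associative.
import Mathlib
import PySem

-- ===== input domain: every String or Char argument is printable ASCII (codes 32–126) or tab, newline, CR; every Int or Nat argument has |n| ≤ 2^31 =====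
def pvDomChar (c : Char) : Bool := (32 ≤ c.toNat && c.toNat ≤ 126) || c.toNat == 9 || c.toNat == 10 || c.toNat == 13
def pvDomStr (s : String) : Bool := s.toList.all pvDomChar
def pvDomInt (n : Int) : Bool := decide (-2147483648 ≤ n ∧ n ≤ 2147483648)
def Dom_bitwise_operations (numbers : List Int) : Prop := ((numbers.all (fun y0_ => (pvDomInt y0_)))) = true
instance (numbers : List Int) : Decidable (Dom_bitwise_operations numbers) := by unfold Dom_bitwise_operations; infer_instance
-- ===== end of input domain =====

-- B replaces A's single accumulator loop by a divide-and-conquer recursion (split in half, recurse, combine with &/|/^); objective: alternative.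


-- ===== PORT A =====
-- A: seed all three accumulators with the first element (IndexError on the empty list), then one loop over numbers[1:] updates all three.
def bitwise_operations (numbers : List Int) : Int × Int × Int :=
  match numbers with
  | [] => (0, 0, 0)  -- unreachable under Pre_ (Python raises IndexError)
  | h :: _ =>
    (PySem.List.slice numbers (some 1) none).foldl
      (fun (st : Int × Int × Int) num => (PySem.Int.band st.1 num, PySem.Int.bor st.2.1 num, PySem.Int.bxor st.2.2 num))
      (h, h, h)

-- ===== PORT B =====
-- B: divide and conquer — split at len//2, recurse on each half, combine the two triples pairwise with &, |, ^.
def bitwise_operations_alt (numbers : List Int) : Int × Int × Int :=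
  if numbers.length ≤ 1 then
    match numbers with
    | [] => (0, 0, 0)  -- unreachable under Pre_ (Python raises IndexError)
    | n :: _ => (n, n, n)
  else
    let mid : Int := PySem.Int.floordiv (numbers.length : Int) 2
    let p := bitwise_operations_alt (PySem.List.slice numbers none (some mid))
    let q := bitwise_operations_alt (PySem.List.slice numbers (some mid) none)
    (PySem.Int.band p.1 q.1, PySem.Int.bor p.2.1 q.2.1, PySem.Int.bxor p.2.2 q.2.2)
  termination_by numbers.length
  decreasing_by
  · rename_i hlen
    rw [PySem.Int.floordiv_eq_ediv_of_pos (by omega)]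
    have h2 : ((numbers.length : Int) / 2) = ((numbers.length / 2 : Nat) : Int) := by omega
    rw [h2, PySem.List.slice_to_natCast]
    simp only [List.length_take]
    omega
  · rename_i hlen
    rw [PySem.Int.floordiv_eq_ediv_of_pos (by omega)]
    have h2 : ((numbers.length : Int) / 2) = ((numbers.length / 2 : Nat) : Int) := by omega
    rw [h2, PySem.List.slice_from_natCast]
    simp only [List.length_drop]
    omega

-- ===== PRECONDITION & SPEC =====
-- A raises IndexError on the empty list; Pre_ excludes exactly that input.
def Pre_bitwise_operations (numbers : List Int) : Prop := numbers ≠ []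
instance (numbers : List Int) : Decidable (Pre_bitwise_operations numbers) := by unfold Pre_bitwise_operations; infer_instance
def pvWitness_bitwise_operations : List Int := ([5, 3, 12])

def Spec_bitwise_operations (numbers : List Int) (out : Int × Int × Int) : Prop := out = bitwise_operations_alt numbers
instance (numbers : List Int) (out : Int × Int × Int) : Decidable (Spec_bitwise_operations numbers out) := by unfold Spec_bitwise_operations; infer_instance

-- ===== CLAIM (what is proved, stated in full; the proofs are below) =====
def Claim_equal_bitwise_operations : Prop := ∀ (numbers : List Int), Dom_bitwise_operations numbers → Pre_bitwise_operations numbers → Spec_bitwise_operations numbers (bitwise_operations numbers)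

-- ===== LEMMAS AND PROOFS =====

-- Nat groundwork: disjoint numbers add like xor, and ldiff is subtraction of the overlap.
theorem pv_add_eq_xor_of_and_eq_zero : ∀ (x : Nat), ∀ (y : Nat), x &&& y = 0 → x + y = x ^^^ y := by
  intro x
  induction x using Nat.strong_induction_on with
  | _ x ih =>
    intro y hxy
    rcases Nat.eq_zero_or_pos x with hx | hx
    · subst hx; simp
    · have hd : x / 2 &&& y / 2 = 0 := by rw [← Nat.and_div_two, hxy]
      have hih := ih (x / 2) (by omega) (y / 2) hd
      have h1 : (x ^^^ y) / 2 = x / 2 ^^^ y / 2 := Nat.xor_div_two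
      have h2 : (x ^^^ y) % 2 = (x + y) % 2 := Nat.xor_mod_two_eq
      have h3 : ¬ (x % 2 = 1 ∧ y % 2 = 1) := by
        rintro ⟨ha, hb⟩
        have := Nat.and_mod_two_eq_one.mpr ⟨ha, hb⟩
        rw [hxy] at this
        simp at this
      omega

theorem pv_sub_and_eq_ldiff (m n : Nat) : m - (m &&& n) = m.ldiff n := by
  have hx : (m &&& n) ^^^ (m.ldiff n) = m := by
    apply Nat.eq_of_testBit_eq
    intro i
    simp only [Nat.testBit_xor, Nat.testBit_and, Nat.testBit_ldiff]
    cases m.testBit i <;> cases n.testBit i <;> rfl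
  have hd : (m &&& n) &&& (m.ldiff n) = 0 := by
    apply Nat.eq_of_testBit_eq
    intro i
    simp only [Nat.testBit_and, Nat.testBit_ldiff, Nat.zero_testBit]
    cases m.testBit i <;> cases n.testBit i <;> rfl
  have hadd := pv_add_eq_xor_of_and_eq_zero _ _ hd
  omega

-- PySem's Python-exact bitwise ops coincide with core Int.land / Int.lor / Int.xor.
theorem pv_band_eq_land (a b : Int) : PySem.Int.band a b = Int.land a b := by
  rcases a with m | m <;> rcases b with n | n <;>
    simp [PySem.Int.band, Int.land, Int.negSucc_eq, pv_sub_and_eq_ldiff] <;> omega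

theorem pv_bor_eq_lor (a b : Int) : PySem.Int.bor a b = Int.lor a b := by
  rcases a with m | m <;> rcases b with n | n <;>
    simp [PySem.Int.bor, Int.lor, Int.negSucc_eq, pv_sub_and_eq_ldiff] <;> omega

theorem pv_bxor_eq_xor (a b : Int) : PySem.Int.bxor a b = Int.xor a b := by
  rcases a with m | m <;> rcases b with n | n <;>
    simp [PySem.Int.bxor, Int.xor, Int.negSucc_eq] <;> omega

-- testBit extensionality for Int, and associativity of the three ops.
theorem pv_high_bit (m n : Nat) : m.testBit (m + n) = false ∧ n.testBit (m + n) = false := by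
  constructor <;> apply Nat.testBit_lt_two_pow
  · calc m < 2 ^ m := Nat.lt_two_pow_self
    _ ≤ 2 ^ (m + n) := Nat.pow_le_pow_right (by omega) (by omega)
  · calc n < 2 ^ n := Nat.lt_two_pow_self
    _ ≤ 2 ^ (m + n) := Nat.pow_le_pow_right (by omega) (by omega)

theorem pv_int_ext {a b : Int} (h : ∀ i, a.testBit i = b.testBit i) : a = b := by
  rcases a with m | m <;> rcases b with n | n
  · exact congrArg Int.ofNat (Nat.eq_of_testBit_eq fun i => by simpa [Int.testBit] using h i)
  · have := h (m + n)
    simp [Int.testBit, (pv_high_bit m n).1, (pv_high_bit m n).2] at this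
  · have := h (n + m)
    simp [Int.testBit, (pv_high_bit n m).1, (pv_high_bit n m).2] at this
  · have : m = n := Nat.eq_of_testBit_eq fun i => by
      have := h i
      simp [Int.testBit] at this
      exact this
    exact congrArg Int.negSucc this

theorem pv_band_assoc (a b c : Int) :
    PySem.Int.band (PySem.Int.band a b) c = PySem.Int.band a (PySem.Int.band b c) := by
  simp only [pv_band_eq_land]
  exact pv_int_ext fun i => by simp [Int.testBit_land, Bool.and_assoc]

theorem pv_bor_assoc (a b c : Int) :
    PySem.Int.bor (PySem.Int.bor a b) c = PySem.Int.bor a (PySem.Int.bor b c) := by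
  simp only [pv_bor_eq_lor]
  exact pv_int_ext fun i => by simp [Int.testBit_lor, Bool.or_assoc]

theorem pv_bxor_assoc (a b c : Int) :
    PySem.Int.bxor (PySem.Int.bxor a b) c = PySem.Int.bxor a (PySem.Int.bxor b c) := by
  simp only [pv_bxor_eq_xor]
  exact pv_int_ext fun i => by simp [Int.testBit_lxor]

-- folds of an associative op merge across a split
theorem pv_foldl_assoc_merge (op : Int → Int → Int)
    (hop : ∀ a b c, op (op a b) c = op a (op b c)) (l m : List Int) (x y : Int) :
    op (l.foldl op x) (m.foldl op y) = (l ++ y :: m).foldl op x := by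
  have inner : ∀ (m : List Int) (A y : Int), op A (m.foldl op y) = m.foldl op (op A y) := by
    intro m
    induction m with
    | nil => intro A y; rfl
    | cons z m ih => intro A y; simp only [List.foldl]; rw [ih, hop]
  rw [List.foldl_append, inner, List.foldl]

-- B's divide-and-conquer computes the three seeded left folds
theorem pv_alt_eq : ∀ (n : Nat) (h : Int) (t : List Int), (h :: t).length = n →
    bitwise_operations_alt (h :: t)
      = (t.foldl PySem.Int.band h, t.foldl PySem.Int.bor h, t.foldl PySem.Int.bxor h) := by
  intro n
  induction n using Nat.strong_induction_on with
  | _ n ih =>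
    intro h t hlen
    rw [bitwise_operations_alt]
    by_cases hle : (h :: t).length ≤ 1
    · have ht : t = [] := by
        cases t with
        | nil => rfl
        | cons a s => exfalso; simp only [List.length_cons] at hle; omega
      subst ht
      simp
    · rw [if_neg hle]
      have hmid : PySem.Int.floordiv (((h :: t).length : Int)) 2 = (((h :: t).length / 2 : Nat) : Int) := by
        have := PySem.Int.floordiv_natCast (h :: t).length 2
        exact_mod_cast this
      simp only [hmid, PySem.List.slice_to_natCast, PySem.List.slice_from_natCast]
      obtain ⟨k, hk⟩ : ∃ k, (h :: t).length / 2 = k + 1 := by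
        refine ⟨(h :: t).length / 2 - 1, ?_⟩
        simp only [List.length_cons] at hle ⊢
        omega
      rw [hk]
      have htake : (h :: t).take (k + 1) = h :: t.take k := by simp
      have hdrop : (h :: t).drop (k + 1) = t.drop k := by simp
      rw [htake, hdrop]
      rcases hdt : t.drop k with _ | ⟨h₂, t₂⟩
      · exfalso
        have := congrArg List.length hdt
        simp only [List.length_drop, List.length_nil, List.length_cons] at this hk hle
        omega
      · have hlt1 : (h :: t.take k).length < n := by
          have := congrArg List.length hdt
          simp only [List.length_cons, List.length_take, List.length_drop] at this hlen hk ⊢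
          omega
        have hlt2 : (h₂ :: t₂).length < n := by
          have := congrArg List.length hdt
          simp only [List.length_cons, List.length_drop] at this hlen hk ⊢
          omega
        rw [ih _ hlt1 h (t.take k) rfl, ih _ hlt2 h₂ t₂ rfl]
        have hsplit : t.take k ++ h₂ :: t₂ = t := by rw [← hdt]; exact List.take_append_drop _ _
        simp only []
        rw [pv_foldl_assoc_merge _ pv_band_assoc, pv_foldl_assoc_merge _ pv_bor_assoc,
            pv_foldl_assoc_merge _ pv_bxor_assoc, hsplit]

-- A's triple-accumulator fold splits into three folds
theorem pv_triple_fold_split (t : List Int) (a o x : Int) :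
    t.foldl (fun (st : Int × Int × Int) num => (PySem.Int.band st.1 num, PySem.Int.bor st.2.1 num, PySem.Int.bxor st.2.2 num)) (a, o, x)
      = (t.foldl PySem.Int.band a, t.foldl PySem.Int.bor o, t.foldl PySem.Int.bxor x) := by
  induction t generalizing a o x with
  | nil => rfl
  | cons n t ih => simpa [List.foldl] using ih (PySem.Int.band a n) (PySem.Int.bor o n) (PySem.Int.bxor x n)

-- ===== VERDICT =====
theorem bitwise_operations_spec : Claim_equal_bitwise_operations := by
  intro numbers _ hpre
  unfold Spec_bitwise_operations
  cases numbers with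
  | nil => exact absurd rfl hpre
  | cons h t =>
    rw [pv_alt_eq (h :: t).length h t rfl]
    unfold bitwise_operations
    rw [PySem.List.slice_from_one]
    simpa using pv_triple_fold_split t h h h
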